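-- pv_equiv track=rewrite | github.com/Dev130/gfg_problems | potd_31July25.py | powerfulInteger
-- ===== SOURCE A (Python) =====
-- def powerfulInteger(intervals, k):
--     from collections import defaultdict
--
--     events = defaultdict(int)
--     for l, r in intervals:
--         events[l] += 1
--         events[r+1] -= 1
--
--     # All event points sorted
--     sorted_points = sorted(events.keys())
--     cnt = 0
--     ans = -1
--
--     for i, x in enumerate(sorted_points):
--         cnt += events[x]
--         # We care about the _previous_ segment, which ends here (at x-1)
--         if cnt >= k:
--             # Next event position or "infinity"
--             if i + 1 < len(sorted_points):
--                 nxt = sorted_points[i+1] - 1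
--             else:
--                 nxt = x
--             ans = max(ans, nxt)
--
--     return ans
-- ===== SOURCE B (Python) =====
-- def powerfulInteger(intervals, k):
--     # The maximal covered point (coverage >= k, k >= 1) is always some interval's
--     # right endpoint; check each right endpoint directly by counting.
--     best = -1
--     for _, r in intervals:
--         covered = sum(1 for l2, _ in intervals if l2 <= r) - sum(1 for _, r2 in intervals if r2 < r)
--         if covered >= k and r > best:
--             best = r
--     return best
-- ===== Notes on version B (the rewrite author's own statement) =====
-- stated objective: simpler
-- what changed: Replaces the delta-event dict + sorted-points accumulating sweep by a direct check of each interval's right endpoint: coverage at r is #(l2<=r) - #(r2<r) counted straight over the intervals, and the best qualifying r is kept (the maximal covered point with k>=1 is always a right endpoint).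
-- outside the precondition, e.g. on powerfulInteger([(1, 3)], 0): A returns 4, B returns 3
import Mathlib
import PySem

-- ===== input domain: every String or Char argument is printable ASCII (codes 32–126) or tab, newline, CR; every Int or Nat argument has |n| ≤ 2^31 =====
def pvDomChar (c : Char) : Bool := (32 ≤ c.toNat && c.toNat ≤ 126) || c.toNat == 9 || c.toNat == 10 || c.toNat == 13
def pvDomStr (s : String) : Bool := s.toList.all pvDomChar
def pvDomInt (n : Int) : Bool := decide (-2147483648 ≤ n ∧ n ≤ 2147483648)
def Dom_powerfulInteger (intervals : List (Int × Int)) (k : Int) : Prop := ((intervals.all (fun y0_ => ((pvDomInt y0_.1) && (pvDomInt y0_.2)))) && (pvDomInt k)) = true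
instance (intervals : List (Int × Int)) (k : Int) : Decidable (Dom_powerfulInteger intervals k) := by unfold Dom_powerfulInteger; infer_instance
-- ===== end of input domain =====

-- B replaces A's delta-event dict + sorted-point sweep by a direct quadratic check of each
-- right endpoint (objective: simpler); equal on Pre_ (k ≥ 1, or no intervals).

-- ===== PORT A =====
-- events = defaultdict(int); for l, r in intervals: events[l] += 1; events[r+1] -= 1
def pvEvents (intervals : List (Int × Int)) : PySem.Dict Int Int :=
  intervals.foldl (fun d p =>
    let d1 := d.insert p.1 (d.getD p.1 0 + 1)
    d1.insert (p.2 + 1) (d1.getD (p.2 + 1) 0 - 1)) PySem.Dict.empty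

-- the 'for i, x in enumerate(sorted_points)' loop with state (cnt, ans);
-- sorted_points[i+1] is read as the head of the remaining suffix (i+1 is in range exactly
-- when the suffix is nonempty, so this is exact)
def pvSweep (k : Int) (ev : Int → Int) : List Int → Int → Int → Int
  | [], _, ans => ans
  | x :: rest, cnt, ans =>
    let cnt' := cnt + ev x
    let ans' := if cnt' ≥ k then
        (let nxt := match rest with
          | y :: _ => y - 1
          | [] => x
         max ans nxt)
      else ans
    pvSweep k ev rest cnt' ans'

def powerfulInteger (intervals : List (Int × Int)) (k : Int) : Int :=
  let events := pvEvents intervals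
  let sortedPoints := PySem.List.sorted events.keys (fun x => x) false
  pvSweep k (fun x => events.getD x 0) sortedPoints 0 (-1)

-- ===== PORT B =====
def powerfulInteger_alt (intervals : List (Int × Int)) (k : Int) : Int :=
  intervals.foldl (fun best p =>
    let covered : Int :=
      (intervals.countP (fun q => decide (q.1 ≤ p.2)) : Int)
        - (intervals.countP (fun q => decide (q.2 < p.2)) : Int)
    if covered ≥ k ∧ p.2 > best then p.2 else best) (-1)

-- ===== PRECONDITION & SPEC =====
-- Pre_ excludes k ≤ 0 with nonempty intervals, on which A still returns: every point is
-- trivially covered by ≥ k intervals there, so the answer is arbitrary — A returns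
-- max(-1, max(r)+1) (the event point past the last interval), B the largest right
-- endpoint; neither value is more defensible than the other on that corner.
def Pre_powerfulInteger (intervals : List (Int × Int)) (k : Int) : Prop :=
  intervals = [] ∨ 1 ≤ k
instance (intervals : List (Int × Int)) (k : Int) : Decidable (Pre_powerfulInteger intervals k) := by
  unfold Pre_powerfulInteger; infer_instance

def pvWitness_powerfulInteger : (List (Int × Int)) × Int := ([(1, 3), (2, 5), (7, 4)], 2)

def Spec_powerfulInteger (intervals : List (Int × Int)) (k : Int) (out : Int) : Prop := out = powerfulInteger_alt intervals k
instance (intervals : List (Int × Int)) (k : Int) (out : Int) : Decidable (Spec_powerfulInteger intervals k out) := by unfold Spec_powerfulInteger; infer_instance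

-- ===== CLAIM (what is proved, stated in full; the proofs are below) =====
def Claim_equal_powerfulInteger : Prop := ∀ (intervals : List (Int × Int)) (k : Int), Dom_powerfulInteger intervals k → Pre_powerfulInteger intervals k → Spec_powerfulInteger intervals k (powerfulInteger intervals k)

-- ===== LEMMAS AND PROOFS =====

-- coverage at x: #(intervals with l ≤ x) − #(intervals with r < x); the quantity both
-- programs compute
def pvF (I : List (Int × Int)) (x : Int) : Int :=
  (I.countP (fun q => decide (q.1 ≤ x)) : Int) - (I.countP (fun q => decide (q.2 < x)) : Int)

-- the delta stored at each event point
theorem pvEvents_getD (I : List (Int × Int)) (x : Int) :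
    (pvEvents I).getD x 0 =
      (I.countP (fun p => decide (p.1 = x)) : Int) - (I.countP (fun p => decide (p.2 + 1 = x)) : Int) := by
  have e1 : ∀ (d : PySem.Dict Int Int) (kk v z : Int),
      (d.insert kk v).getD z 0 = if z = kk then v else d.getD z 0 := by
    intro d kk v z
    by_cases h : z = kk
    · subst h; simp [PySem.Dict.getD_insert_self]
    · simp [h, PySem.Dict.getD_insert_of_ne _ _ _ h]
  have h : ∀ (d : PySem.Dict Int Int),
      (I.foldl (fun d p =>
        let d1 := d.insert p.1 (d.getD p.1 0 + 1)
        d1.insert (p.2 + 1) (d1.getD (p.2 + 1) 0 - 1)) d).getD x 0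
        = d.getD x 0 + ((I.countP (fun p => decide (p.1 = x)) : Int)
            - (I.countP (fun p => decide (p.2 + 1 = x)) : Int)) := by
    induction I with
    | nil => intro d; simp
    | cons p t ih =>
      intro d
      rw [List.foldl_cons, ih]
      simp only [List.countP_cons, e1, decide_eq_true_eq]
      split_ifs <;> (try subst_vars) <;> (try simp_all) <;> omega
  have h0 := h PySem.Dict.empty
  simpa [pvEvents, PySem.Dict.getD_empty] using h0

-- the event points are exactly the l's and (r+1)'s
theorem pvEvents_mem_keys (I : List (Int × Int)) (x : Int) :
    x ∈ (pvEvents I).keys ↔ ∃ p ∈ I, x = p.1 ∨ x = p.2 + 1 := by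
  have h : ∀ (d : PySem.Dict Int Int),
      (x ∈ (I.foldl (fun d p =>
        let d1 := d.insert p.1 (d.getD p.1 0 + 1)
        d1.insert (p.2 + 1) (d1.getD (p.2 + 1) 0 - 1)) d).keys
        ↔ x ∈ d.keys ∨ ∃ p ∈ I, x = p.1 ∨ x = p.2 + 1) := by
    induction I with
    | nil => intro d; simp
    | cons p t ih =>
      intro d
      simp only [List.foldl_cons, ih, PySem.Dict.mem_keys_insert, List.mem_cons]
      constructor
      · rintro ((h | h | h) | ⟨q, hq, h⟩)
        · exact Or.inr ⟨p, Or.inl rfl, Or.inr h⟩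
        · exact Or.inr ⟨p, Or.inl rfl, Or.inl h⟩
        · exact Or.inl h
        · exact Or.inr ⟨q, Or.inr hq, h⟩
      · rintro (h | ⟨q, hq | hq, h⟩)
        · exact Or.inl (Or.inr (Or.inr h))
        · subst hq
          rcases h with h | h
          · exact Or.inl (Or.inr (Or.inl h))
          · exact Or.inl (Or.inl h)
        · exact Or.inr ⟨q, hq, h⟩
  have h0 := h PySem.Dict.empty
  simpa [pvEvents, PySem.Dict.keys_empty] using h0

theorem pvEvents_keys_nodup (I : List (Int × Int)) : (pvEvents I).keys.Nodup := by
  have h : ∀ (d : PySem.Dict Int Int), d.keys.Nodup →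
      (I.foldl (fun d p =>
        let d1 := d.insert p.1 (d.getD p.1 0 + 1)
        d1.insert (p.2 + 1) (d1.getD (p.2 + 1) 0 - 1)) d).keys.Nodup := by
    induction I with
    | nil => intro d hd; simpa using hd
    | cons p t ih =>
      intro d hd
      simp only [List.foldl_cons]
      exact ih _ (PySem.Dict.nodup_keys_insert _ _ _ (PySem.Dict.nodup_keys_insert _ _ _ hd))
  exact h PySem.Dict.empty (by simp [PySem.Dict.keys_empty])

-- counting membership in e :: S splits when e ∉ S
theorem countP_mem_cons (L : List (Int × Int)) (f : Int × Int → Int) (e : Int) (S : List Int)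
    (he : e ∉ S) :
    L.countP (fun p => decide (f p ∈ e :: S)) =
      L.countP (fun p => decide (f p = e)) + L.countP (fun p => decide (f p ∈ S)) := by
  induction L with
  | nil => simp
  | cons a L ih =>
    rw [List.countP_cons, List.countP_cons, List.countP_cons, ih]
    by_cases h1 : f a = e
    · have h2 : f a ∉ S := fun hh => he (h1 ▸ hh)
      simp only [List.mem_cons, h1, decide_eq_true_eq]
      simp [he]
      omega
    · by_cases h2 : f a ∈ S
      · simp [List.mem_cons, h1, h2]
        omega
      · simp [List.mem_cons, h1, h2]

-- summing per-point equality counts over a duplicate-free list counts membership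
theorem sum_countP_eq (S : List Int) (hS : S.Nodup) (L : List (Int × Int)) (f : Int × Int → Int) :
    (S.map (fun e => (L.countP (fun p => decide (f p = e)) : Int))).sum =
      (L.countP (fun p => decide (f p ∈ S)) : Int) := by
  induction S with
  | nil => simp
  | cons e S ih =>
    have he : e ∉ S := (List.nodup_cons.mp hS).1
    rw [List.map_cons, List.sum_cons, ih (List.nodup_cons.mp hS).2,
      countP_mem_cons L f e S he]
    push_cast
    ring

-- coverage at y is the sum of the deltas at event points ≤ y
theorem pvF_eq_sum (I : List (Int × Int)) (E : List Int) (hnd : E.Nodup)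
    (hmem : ∀ p ∈ I, p.1 ∈ E ∧ p.2 + 1 ∈ E) (y : Int) :
    ((E.filter (fun e => decide (e ≤ y))).map (fun e => (pvEvents I).getD e 0)).sum = pvF I y := by
  have hSnd : (E.filter (fun e => decide (e ≤ y))).Nodup := List.Nodup.filter _ hnd
  have hsub : ∀ (S : List Int),
      (S.map (fun e => (pvEvents I).getD e 0)).sum
        = (S.map (fun e => (I.countP (fun p => decide (p.1 = e)) : Int))).sum
          - (S.map (fun e => (I.countP (fun p => decide (p.2 + 1 = e)) : Int))).sum := by
    intro S
    induction S with
    | nil => simp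
    | cons e S ih =>
      simp only [List.map_cons, List.sum_cons]
      rw [ih, pvEvents_getD]
      ring
  rw [hsub, sum_countP_eq _ hSnd I (fun p => p.1), sum_countP_eq _ hSnd I (fun p => p.2 + 1)]
  have c1 : I.countP (fun p => decide (p.1 ∈ E.filter (fun e => decide (e ≤ y))))
      = I.countP (fun p => decide (p.1 ≤ y)) := by
    apply List.countP_congr
    intro p hp
    simp [List.mem_filter, (hmem p hp).1]
  have c2 : I.countP (fun p => decide (p.2 + 1 ∈ E.filter (fun e => decide (e ≤ y))))
      = I.countP (fun p => decide (p.2 < y)) := by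
    apply List.countP_congr
    intro p hp
    simp only [List.mem_filter, (hmem p hp).2, true_and]
    simp only [decide_eq_true_eq]
    omega
  rw [c1, c2, pvF]

-- in a strictly increasing list split at x, the elements ≤ y (x ≤ y, y below the tail)
-- are exactly the prefix together with x
theorem filter_le_split (E done : List Int) (x : Int) (rest : List Int)
    (hE : E = done ++ x :: rest) (hp : E.Pairwise (· < ·)) (y : Int) (hxy : x ≤ y)
    (hy : ∀ z ∈ rest, y < z) :
    E.filter (fun e => decide (e ≤ y)) = done ++ [x] := by
  subst hE
  rw [List.pairwise_append] at hp
  obtain ⟨hd, hx, hcross⟩ := hp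
  rw [List.filter_append]
  have h1 : done.filter (fun e => decide (e ≤ y)) = done := by
    rw [List.filter_eq_self]
    intro a ha
    have := hcross a ha x (List.mem_cons_self ..)
    simp; omega
  have h2 : (x :: rest).filter (fun e => decide (e ≤ y)) = [x] := by
    rw [List.filter_cons_of_pos (by simp; omega)]
    have h3 : rest.filter (fun e => decide (e ≤ y)) = [] := by
      rw [List.filter_eq_nil_iff]
      intro a ha
      have := hy a ha
      simp; omega
    rw [h3]
  rw [h1, h2]

-- coverage is constant from a split point up to just before the rest of the list
theorem pvF_split (I : List (Int × Int)) (E done : List Int) (x : Int) (rest : List Int)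
    (hE : E = done ++ x :: rest) (hp : E.Pairwise (· < ·)) (hnd : E.Nodup)
    (hmem : ∀ p ∈ I, p.1 ∈ E ∧ p.2 + 1 ∈ E) (y : Int) (hxy : x ≤ y)
    (hy : ∀ z ∈ rest, y < z) :
    pvF I y = ((done.map (fun e => (pvEvents I).getD e 0)).sum + (pvEvents I).getD x 0) := by
  rw [← pvF_eq_sum I E hnd hmem y, filter_le_split E done x rest hE hp y hxy hy]
  simp

-- at or past the last event point the coverage is 0
theorem pvF_last (I : List (Int × Int)) (E : List Int)
    (hmem : ∀ p ∈ I, p.1 ∈ E ∧ p.2 + 1 ∈ E) (x : Int) (hx : ∀ e ∈ E, e ≤ x) :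
    pvF I x = 0 := by
  have c1 : I.countP (fun p => decide (p.1 ≤ x)) = I.length := by
    rw [List.countP_eq_length]
    intro p hp
    have := hx p.1 (hmem p hp).1
    simp; omega
  have c2 : I.countP (fun p => decide (p.2 < x)) = I.length := by
    rw [List.countP_eq_length]
    intro p hp
    have := hx (p.2 + 1) (hmem p hp).2
    simp; omega
  rw [pvF, c1, c2]
  ring

-- the candidates A's sweep feeds into max
def pvCands (k : Int) (ev : Int → Int) : List Int → Int → List Int
  | [], _ => []
  | x :: rest, cnt =>
    let cnt' := cnt + ev x
    if cnt' ≥ k then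
      (match rest with | y :: _ => y - 1 | [] => x) :: pvCands k ev rest cnt'
    else pvCands k ev rest cnt'

theorem pvSweep_eq_foldl (k : Int) (ev : Int → Int) :
    ∀ (s : List Int) (cnt ans : Int), pvSweep k ev s cnt ans = (pvCands k ev s cnt).foldl max ans := by
  intro s
  induction s with
  | nil => intro cnt ans; rfl
  | cons x rest ih =>
    intro cnt ans
    simp only [pvSweep, pvCands]
    by_cases h : cnt + ev x ≥ k
    · rw [if_pos h, if_pos h, List.foldl_cons]
      exact ih ..
    · rw [if_neg h, if_neg h]
      exact ih ..

theorem pvCands_sound (k : Int) (ev : Int → Int) :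
    ∀ (s : List Int) (cnt c : Int), c ∈ pvCands k ev s cnt →
      ∃ d2 x rest, s = d2 ++ x :: rest ∧ cnt + ((d2.map ev).sum + ev x) ≥ k ∧
        c = (match rest with | y :: _ => y - 1 | [] => x) := by
  intro s
  induction s with
  | nil => intro cnt c h; simp [pvCands] at h
  | cons x rest ih =>
    intro cnt c h
    simp only [pvCands] at h
    by_cases hc : cnt + ev x ≥ k
    · rw [if_pos hc] at h
      rcases List.mem_cons.mp h with h | h
      · exact ⟨[], x, rest, rfl, by simpa using hc, h⟩
      · obtain ⟨d2, x', rest', hs, hk2, hcand⟩ := ih _ _ h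
        refine ⟨x :: d2, x', rest', by rw [List.cons_append, hs], ?_, hcand⟩
        simp only [List.map_cons, List.sum_cons] at hk2 ⊢
        omega
    · rw [if_neg hc] at h
      obtain ⟨d2, x', rest', hs, hk2, hcand⟩ := ih _ _ h
      refine ⟨x :: d2, x', rest', by rw [List.cons_append, hs], ?_, hcand⟩
      simp only [List.map_cons, List.sum_cons] at hk2 ⊢
      omega

theorem pvCands_mem (k : Int) (ev : Int → Int) :
    ∀ (d2 : List Int) (x : Int) (rest : List Int) (cnt : Int),
      cnt + ((d2.map ev).sum + ev x) ≥ k →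
      (match rest with | y :: _ => y - 1 | [] => x) ∈ pvCands k ev (d2 ++ x :: rest) cnt := by
  intro d2
  induction d2 with
  | nil =>
    intro x rest cnt hge
    simp only [List.nil_append, pvCands]
    rw [if_pos (by simpa using hge)]
    exact List.mem_cons_self ..
  | cons e d2 ih =>
    intro x rest cnt hge
    have hge' : (cnt + ev e) + ((d2.map ev).sum + ev x) ≥ k := by
      simp only [List.map_cons, List.sum_cons] at hge
      omega
    have hm := ih x rest (cnt + ev e) hge'
    simp only [List.cons_append, pvCands]
    by_cases hc : cnt + ev e ≥ k
    · rw [if_pos hc]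
      exact List.mem_cons_of_mem _ hm
    · rw [if_neg hc]
      exact hm

-- B's loop is a running max over the qualifying right endpoints
theorem alt_eq_foldl_max (I : List (Int × Int)) (k : Int) :
    powerfulInteger_alt I k =
      ((I.filter (fun p => decide (k ≤ pvF I p.2))).map (fun p => p.2)).foldl max (-1) := by
  simp only [pvF]
  have h : ∀ (L : List (Int × Int)) (best : Int),
      L.foldl (fun best p =>
        let covered : Int :=
          (I.countP (fun q => decide (q.1 ≤ p.2)) : Int)
            - (I.countP (fun q => decide (q.2 < p.2)) : Int)
        if covered ≥ k ∧ p.2 > best then p.2 else best) best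
      = ((L.filter (fun p => decide (k ≤
            (I.countP (fun q => decide (q.1 ≤ p.2)) : Int)
              - (I.countP (fun q => decide (q.2 < p.2)) : Int)))).map (fun p => p.2)).foldl max best := by
    intro L
    induction L with
    | nil => intro best; rfl
    | cons p L ih =>
      intro best
      simp only [List.foldl_cons]
      by_cases hc : k ≤ (I.countP (fun q => decide (q.1 ≤ p.2)) : Int)
          - (I.countP (fun q => decide (q.2 < p.2)) : Int)
      · rw [List.filter_cons_of_pos (by simpa using hc)]
        simp only [List.map_cons, List.foldl_cons]
        rw [ih]
        have hstart : (if k ≤ (I.countP (fun q => decide (q.1 ≤ p.2)) : Int)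
              - (I.countP (fun q => decide (q.2 < p.2)) : Int) ∧ best < p.2 then p.2 else best)
            = max best p.2 := by
          by_cases hb : best < p.2
          · rw [if_pos ⟨hc, hb⟩]; omega
          · rw [if_neg (fun hh => hb hh.2)]; omega
        rw [hstart]
      · rw [List.filter_cons_of_neg (by simpa using hc)]
        rw [ih]
        have hstart : (if k ≤ (I.countP (fun q => decide (q.1 ≤ p.2)) : Int)
              - (I.countP (fun q => decide (q.2 < p.2)) : Int) ∧ best < p.2 then p.2 else best)
            = best := by
          rw [if_neg (fun hh => hc hh.1)]
        rw [hstart]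
  exact h I (-1)

theorem foldl_max_le (a c : Int) (L : List Int) (ha : a ≤ c) (hL : ∀ x ∈ L, x ≤ c) :
    L.foldl max a ≤ c := by
  rcases PySem.List.foldl_max_mem L a with h | h
  · rw [h]; exact ha
  · exact hL _ h

theorem foldl_max_eq_of_dom (a : Int) (L1 L2 : List Int)
    (h12 : ∀ x ∈ L1, ∃ y ∈ L2, x ≤ y) (h21 : ∀ y ∈ L2, ∃ x ∈ L1, y ≤ x) :
    L1.foldl max a = L2.foldl max a := by
  have key : ∀ (M1 M2 : List Int), (∀ x ∈ M1, ∃ y ∈ M2, x ≤ y) → M1.foldl max a ≤ M2.foldl max a := by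
    intro M1 M2 h
    apply foldl_max_le
    · exact (PySem.List.le_foldl_max M2 a).1
    · intro x hx
      obtain ⟨y, hy, hxy⟩ := h x hx
      exact le_trans hxy ((PySem.List.le_foldl_max M2 a).2 y hy)
  exact le_antisymm (key L1 L2 h12) (key L2 L1 h21)

-- the right endpoints below t and those at or above t count the whole list
theorem countP_lt_add_ge (I : List (Int × Int)) (t : Int) :
    I.countP (fun q => decide (q.2 < t)) + I.countP (fun q => decide (t ≤ q.2)) = I.length := by
  induction I with
  | nil => simp
  | cons a L ih =>
    simp only [List.countP_cons, List.length_cons]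
    by_cases h : a.2 < t
    · have h2 : ¬ t ≤ a.2 := by omega
      simp [h, h2]
      omega
    · have h2 : t ≤ a.2 := by omega
      simp [h, h2]
      omega

-- if coverage ≥ k ≥ 1 at t, the smallest right endpoint ≥ t still has coverage ≥ k
theorem exists_good_r (I : List (Int × Int)) (k t : Int) (hk : 1 ≤ k) (ht : k ≤ pvF I t) :
    ∃ p ∈ I, t ≤ p.2 ∧ k ≤ pvF I p.2 := by
  have hlen := countP_lt_add_ge I t
  have hle : I.countP (fun q => decide (q.1 ≤ t)) ≤ I.length := List.countP_le_length
  have hpos : 0 < I.countP (fun q => decide (t ≤ q.2)) := by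
    unfold pvF at ht
    omega
  have hS : ∃ q ∈ I, decide (t ≤ q.2) = true := List.countP_pos_iff.mp hpos
  -- the qualifying right endpoints
  have hSne : ((I.filter (fun q => decide (t ≤ q.2))).map (fun q => q.2)) ≠ [] := by
    obtain ⟨q, hq, hqt⟩ := hS
    have : q ∈ I.filter (fun q => decide (t ≤ q.2)) := List.mem_filter.mpr ⟨hq, hqt⟩
    intro h0
    rw [List.map_eq_nil_iff] at h0
    exact List.ne_nil_of_mem this h0
  obtain ⟨r, hrsome⟩ : ∃ r, PySem.List.min? ((I.filter (fun q => decide (t ≤ q.2))).map (fun q => q.2)) (fun x => x) = some r := by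
    cases h : PySem.List.min? ((I.filter (fun q => decide (t ≤ q.2))).map (fun q => q.2)) (fun x => x) with
    | none => exact absurd ((PySem.List.min?_eq_none_iff _ _).mp h) hSne
    | some r => exact ⟨r, rfl⟩
  have hrmem := PySem.List.min?_mem hrsome
  have hrmin := PySem.List.min?_isMin hrsome
  obtain ⟨p, hpf, hpr⟩ := List.mem_map.mp hrmem
  have hpI : p ∈ I := (List.mem_filter.mp hpf).1
  have hpt : t ≤ p.2 := by simpa using (List.mem_filter.mp hpf).2
  refine ⟨p, hpI, hpt, ?_⟩
  have hc1 : I.countP (fun q => decide (q.1 ≤ t)) ≤ I.countP (fun q => decide (q.1 ≤ p.2)) := by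
    apply List.countP_mono_left
    intro a _
    simp only [decide_eq_true_eq]
    omega
  have hc2 : I.countP (fun q => decide (q.2 < p.2)) ≤ I.countP (fun q => decide (q.2 < t)) := by
    apply List.countP_mono_left
    intro a ha
    simp only [decide_eq_true_eq]
    intro halt
    by_contra hge
    rw [not_lt] at hge
    have haf : a ∈ I.filter (fun q => decide (t ≤ q.2)) := List.mem_filter.mpr ⟨ha, by simpa using hge⟩
    have : a.2 ∈ (I.filter (fun q => decide (t ≤ q.2))).map (fun q => q.2) := List.mem_map.mpr ⟨a, haf, rfl⟩
    have hra := hrmin _ this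
    simp only at hra
    omega
  unfold pvF at ht ⊢
  omega

-- elements dropped by takeWhile (≤ y) on a strictly increasing list are all > y
theorem dropWhile_gt (y : Int) : ∀ (sp : List Int), sp.Pairwise (· < ·) →
    ∀ z ∈ sp.dropWhile (fun e => decide (e ≤ y)), y < z := by
  intro sp
  induction sp with
  | nil => intro _ z hz; simp at hz
  | cons a t ih =>
    intro hp z hz
    by_cases ha : a ≤ y
    · rw [List.dropWhile_cons_of_pos (by simpa using ha)] at hz
      exact ih (List.pairwise_cons.mp hp).2 z hz
    · rw [List.dropWhile_cons_of_neg (by simpa using ha)] at hz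
      rcases List.mem_cons.mp hz with rfl | hz
      · omega
      · have := (List.pairwise_cons.mp hp).1 z hz
        omega

theorem powerfulInteger_spec : Claim_equal_powerfulInteger := by
  intro I k _ hpre
  unfold Spec_powerfulInteger
  rcases hpre with rfl | hk
  · rfl
  · -- abbreviations
    have hndk : (pvEvents I).keys.Nodup := pvEvents_keys_nodup I
    set E := PySem.List.sorted (pvEvents I).keys (fun x => x) false with hEdef
    have hnd : E.Nodup :=
      ((PySem.List.sorted_perm (pvEvents I).keys (fun x => x) false).symm).nodup hndk
    have hle : E.Pairwise (fun a b => a ≤ b) := PySem.List.sorted_pairwise (pvEvents I).keys (fun x => x)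
    have hp : E.Pairwise (· < ·) :=
      (List.Pairwise.and hle hnd).imp (fun h => lt_of_le_of_ne h.1 h.2)
    have hmemE : ∀ x, x ∈ E ↔ ∃ p ∈ I, x = p.1 ∨ x = p.2 + 1 := by
      intro x
      rw [hEdef, PySem.List.mem_sorted]
      exact pvEvents_mem_keys I x
    have hmem : ∀ p ∈ I, p.1 ∈ E ∧ p.2 + 1 ∈ E := by
      intro p hpI
      exact ⟨(hmemE p.1).mpr ⟨p, hpI, Or.inl rfl⟩, (hmemE (p.2 + 1)).mpr ⟨p, hpI, Or.inr rfl⟩⟩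
    have hA : powerfulInteger I k = (pvCands k (fun e => (pvEvents I).getD e 0) E 0).foldl max (-1) := by
      simp only [powerfulInteger]
      rw [pvSweep_eq_foldl]
    rw [hA, alt_eq_foldl_max I k]
    apply foldl_max_eq_of_dom
    · -- every sweep candidate is dominated by a qualifying right endpoint
      intro c hc
      obtain ⟨d2, x, rest, hsplitE, hge, hcand⟩ := pvCands_sound k _ E 0 c hc
      have hxrest : ∀ z ∈ rest, x < z := by
        have h2 := (List.pairwise_append.mp (hsplitE ▸ hp)).2.1
        exact (List.pairwise_cons.mp h2).1
      have hfx : pvF I x = ((d2.map (fun e => (pvEvents I).getD e 0)).sum + (pvEvents I).getD x 0) :=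
        pvF_split I E d2 x rest hsplitE hp hnd hmem x le_rfl hxrest
      simp only [zero_add] at hge
      have hgx : k ≤ pvF I x := by rw [hfx]; exact hge
      cases rest with
      | nil =>
        exfalso
        have hall : ∀ e ∈ E, e ≤ x := by
          intro e he
          rw [hsplitE] at he
          rcases List.mem_append.mp he with h | h
          · have := (List.pairwise_append.mp (hsplitE ▸ hp)).2.2 e h x (List.mem_cons_self ..)
            omega
          · rcases List.mem_cons.mp h with rfl | h
            · exact le_rfl
            · simp at h
        have h0 := pvF_last I E hmem x hall
        omega
      | cons y rest' =>
        have hccand : c = y - 1 := hcand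
        have hxy : x < y := hxrest y (List.mem_cons_self ..)
        have hyrest : ∀ z ∈ y :: rest', y - 1 < z := by
          intro z hz
          rcases List.mem_cons.mp hz with rfl | hz
          · omega
          · have h2 := (List.pairwise_append.mp (hsplitE ▸ hp)).2.1
            have h3 := (List.pairwise_cons.mp ((List.pairwise_cons.mp h2).2)).1 z hz
            omega
        have hfy : pvF I (y - 1) = ((d2.map (fun e => (pvEvents I).getD e 0)).sum + (pvEvents I).getD x 0) :=
          pvF_split I E d2 x (y :: rest') hsplitE hp hnd hmem (y - 1) (by omega) hyrest
        have hky : k ≤ pvF I (y - 1) := by rw [hfy, ← hfx]; exact hgx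
        obtain ⟨p, hpI, hpt, hpk⟩ := exists_good_r I k (y - 1) hk hky
        exact ⟨p.2, List.mem_map.mpr ⟨p, List.mem_filter.mpr ⟨hpI, by simpa using hpk⟩, rfl⟩, by omega⟩
    · -- every qualifying right endpoint is dominated by a sweep candidate
      intro r hr
      obtain ⟨p, hpf, rfl⟩ := List.mem_map.mp hr
      have hpI : p ∈ I := (List.mem_filter.mp hpf).1
      have hpk : k ≤ pvF I p.2 := by simpa using (List.mem_filter.mp hpf).2
      have hpos : 0 < I.countP (fun q => decide (q.1 ≤ p.2)) := by
        unfold pvF at hpk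
        omega
      obtain ⟨q, hqI, hq⟩ := List.countP_pos_iff.mp hpos
      have hqE : q.1 ∈ E := (hmem q hqI).1
      have hqle : q.1 ≤ p.2 := by simpa using hq
      have hdropgt := dropWhile_gt p.2 E hp
      have htsplit := List.takeWhile_append_dropWhile (p := fun e => decide (e ≤ p.2)) (l := E)
      have hdne : E.takeWhile (fun e => decide (e ≤ p.2)) ≠ [] := by
        have hq_in : q.1 ∈ E.takeWhile (fun e => decide (e ≤ p.2)) := by
          have hq2 : q.1 ∈ E.takeWhile (fun e => decide (e ≤ p.2)) ++ E.dropWhile (fun e => decide (e ≤ p.2)) := by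
            rw [htsplit]; exact hqE
          rcases List.mem_append.mp hq2 with h | h
          · exact h
          · exact absurd (hdropgt q.1 h) (by omega)
        exact List.ne_nil_of_mem hq_in
      set d := E.takeWhile (fun e => decide (e ≤ p.2)) with hd
      set dr := E.dropWhile (fun e => decide (e ≤ p.2)) with hdr
      set x := d.getLast hdne with hxdef
      have hdx : d.dropLast ++ [x] = d := List.dropLast_concat_getLast hdne
      have hsplitE : E = d.dropLast ++ x :: dr := by
        conv_lhs => rw [← htsplit, ← hdx]
        rw [List.append_assoc, List.singleton_append]
      have hxled : x ≤ p.2 := by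
        have hxd : x ∈ d := List.getLast_mem hdne
        have := List.mem_takeWhile_imp (hd ▸ hxd)
        simpa using this
      have hdrgt : ∀ z ∈ dr, p.2 < z := fun z hz => hdropgt z hz
      have hf1 : pvF I p.2 = ((d.dropLast.map (fun e => (pvEvents I).getD e 0)).sum + (pvEvents I).getD x 0) :=
        pvF_split I E d.dropLast x dr hsplitE hp hnd hmem p.2 hxled hdrgt
      have hf2 : pvF I x = ((d.dropLast.map (fun e => (pvEvents I).getD e 0)).sum + (pvEvents I).getD x 0) :=
        pvF_split I E d.dropLast x dr hsplitE hp hnd hmem x le_rfl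
          (fun z hz => lt_of_le_of_lt hxled (hdrgt z hz))
      have hgex : 0 + ((d.dropLast.map (fun e => (pvEvents I).getD e 0)).sum + (pvEvents I).getD x 0) ≥ k := by
        rw [zero_add, ← hf2]
        omega
      have hm := pvCands_mem k (fun e => (pvEvents I).getD e 0) d.dropLast x dr 0 hgex
      cases hdrc : dr with
      | nil =>
        exfalso
        have hall : ∀ e ∈ E, e ≤ x := by
          intro e he
          rw [hsplitE, hdrc] at he
          rcases List.mem_append.mp he with h | h
          · have h2 := (List.pairwise_append.mp (hsplitE ▸ hp)).2.2 e h x (List.mem_cons_self ..)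
            omega
          · rcases List.mem_cons.mp h with rfl | h
            · exact le_rfl
            · simp at h
        have h0 := pvF_last I E hmem x hall
        omega
      | cons z rest' =>
        rw [hdrc] at hm
        refine ⟨z - 1, ?_, ?_⟩
        · rw [hsplitE, hdrc]
          exact hm
        · have := hdrgt z (by rw [hdrc]; exact List.mem_cons_self ..)
          omega
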